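-- pv_equiv track=rewrite | github.com/liteshperumalla/Powering-AI-Infrastructure-at-Scale | src/infra_mind/agents/cto_agent.py | _create_risk_matrix
-- ===== SOURCE A (Python) =====
-- from typing import Dict, Any, List, Optional
--
-- def _create_risk_matrix(risks: List[Dict[str, Any]]) -> Dict[str, Any]:
--     """Create risk assessment matrix."""
--     matrix = {
--         "high_impact_high_prob": [],
--         "high_impact_low_prob": [],
--         "low_impact_high_prob": [],
--         "low_impact_low_prob": []
--     }
--
--     for risk in risks:
--         impact = risk.get("impact", "medium")
--         probability = risk.get("probability", "medium")
--
--         if impact == "high" and probability in ["high", "medium"]: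
--             matrix["high_impact_high_prob"].append(risk["risk"])
--         elif impact == "high" and probability == "low":
--             matrix["high_impact_low_prob"].append(risk["risk"])
--         elif impact in ["medium", "low"] and probability in ["high", "medium"]:
--             matrix["low_impact_high_prob"].append(risk["risk"])
--         else:
--             matrix["low_impact_low_prob"].append(risk["risk"])
--
--     return matrix
-- ===== SOURCE B (Python) =====
-- _KEYS = ("high_impact_high_prob", "high_impact_low_prob",
--          "low_impact_high_prob", "low_impact_low_prob")
--
--
-- def _bucket_key(risk):
--     """Return the matrix cell a single risk belongs to."""
--     impact = risk.get("impact", "medium")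
--     probability = risk.get("probability", "medium")
--     if impact not in ("high", "medium", "low"):
--         return "low_impact_low_prob"
--     high_impact = impact == "high"
--     if probability in ("high", "medium"):
--         return "high_impact_high_prob" if high_impact else "low_impact_high_prob"
--     if high_impact and probability == "low":
--         return "high_impact_low_prob"
--     return "low_impact_low_prob"
--
--
-- def _create_risk_matrix(risks):
--     """Create risk assessment matrix: one filtering pass per matrix cell."""
--     return {key: [r["risk"] for r in risks if _bucket_key(r) == key]
--             for key in _KEYS}
-- ===== Notes on version B (the rewrite author's own statement) =====
-- stated objective: alternative
-- what changed: Instead of one pass appending each risk into a mutable four-bucket dict, B builds the matrix as a dict comprehension with one filtering pass per cell, selecting the risks whose bucket key (computed by a small classifier helper) equals that cell; filtering preserves order, so each bucket list is identical.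
import Mathlib
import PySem

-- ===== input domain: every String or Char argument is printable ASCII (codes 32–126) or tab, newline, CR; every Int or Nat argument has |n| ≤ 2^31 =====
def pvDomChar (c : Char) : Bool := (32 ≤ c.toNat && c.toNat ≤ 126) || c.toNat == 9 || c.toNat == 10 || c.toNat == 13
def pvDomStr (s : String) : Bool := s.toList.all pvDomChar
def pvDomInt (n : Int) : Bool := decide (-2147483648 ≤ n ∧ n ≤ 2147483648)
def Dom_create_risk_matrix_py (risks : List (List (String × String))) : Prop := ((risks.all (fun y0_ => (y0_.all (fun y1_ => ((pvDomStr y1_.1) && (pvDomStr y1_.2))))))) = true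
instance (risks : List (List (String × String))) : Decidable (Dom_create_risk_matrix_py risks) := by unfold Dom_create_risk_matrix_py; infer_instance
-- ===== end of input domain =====

-- B replaces A's single accumulating pass by one filtering pass per matrix cell (same result, 4 passes instead of 1); return value only.

-- shared primitive: Python's risk.get(k, dflt) on an association list (first match)
def assocGetD (d : List (String × String)) (k dflt : String) : String :=
  match d.find? (fun p => p.1 == k) with
  | some p => p.2
  | none => dflt

-- ===== PORT A =====
def create_risk_matrix_py (risks : List (List (String × String))) : List (String × List String) :=
  let matrix : PySem.Dict String (List String) :=
    ((((PySem.Dict.empty.insert "high_impact_high_prob" []).insert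
        "high_impact_low_prob" []).insert
        "low_impact_high_prob" []).insert
        "low_impact_low_prob" [])
  let final := risks.foldl (fun m risk =>
    let impact := assocGetD risk "impact" "medium"
    let probability := assocGetD risk "probability" "medium"
    -- risk["risk"]: first match; Pre_ guarantees the key is present (Python raises KeyError otherwise)
    let r := assocGetD risk "risk" ""
    if impact == "high" && (probability == "high" || probability == "medium") then
      m.modify "high_impact_high_prob" [] (· ++ [r])
    else if impact == "high" && probability == "low" then
      m.modify "high_impact_low_prob" [] (· ++ [r])
    else if (impact == "medium" || impact == "low") && (probability == "high" || probability == "medium") then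
      m.modify "low_impact_high_prob" [] (· ++ [r])
    else
      m.modify "low_impact_low_prob" [] (· ++ [r])) matrix
  final.items

-- ===== PORT B =====
def pvKeys : List String :=
  ["high_impact_high_prob", "high_impact_low_prob", "low_impact_high_prob", "low_impact_low_prob"]

def bucket_key (risk : List (String × String)) : String :=
  let impact := assocGetD risk "impact" "medium"
  let probability := assocGetD risk "probability" "medium"
  if !(impact == "high" || impact == "medium" || impact == "low") then "low_impact_low_prob"
  else
    let high_impact := impact == "high"
    if probability == "high" || probability == "medium" then
      if high_impact then "high_impact_high_prob" else "low_impact_high_prob"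
    else if high_impact && probability == "low" then "high_impact_low_prob"
    else "low_impact_low_prob"

-- the dict comprehension over the four distinct literal keys, as the association list it builds
def create_risk_matrix_py_alt (risks : List (List (String × String))) : List (String × List String) :=
  pvKeys.map (fun key =>
    (key, (risks.filter (fun r => bucket_key r == key)).map (fun r => assocGetD r "risk" "")))

-- ===== PRECONDITION & SPEC =====
-- Pre_ excludes exactly the inputs where some risk dict lacks the "risk" key: there Python A raises KeyError (and so does B).
def Pre_create_risk_matrix_py (risks : List (List (String × String))) : Prop :=
  (risks.all (fun r => r.any (fun p => p.1 == "risk"))) = true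
instance (risks : List (List (String × String))) : Decidable (Pre_create_risk_matrix_py risks) := by
  unfold Pre_create_risk_matrix_py; infer_instance

def pvWitness_create_risk_matrix_py : (List (List (String × String))) :=
  [[("risk", "r1"), ("impact", "high")], [("risk", "r2"), ("probability", "low")]]

def Spec_create_risk_matrix_py (risks : List (List (String × String))) (out : List (String × List String)) : Prop := out = create_risk_matrix_py_alt risks
instance (risks : List (List (String × String))) (out : List (String × List String)) : Decidable (Spec_create_risk_matrix_py risks out) := by unfold Spec_create_risk_matrix_py; infer_instance

-- ===== CLAIM (what is proved, stated in full; the proofs are below) =====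
def Claim_equal_create_risk_matrix_py : Prop := ∀ (risks : List (List (String × String))), Dom_create_risk_matrix_py risks → Pre_create_risk_matrix_py risks → Spec_create_risk_matrix_py risks (create_risk_matrix_py risks)

-- ===== LEMMAS AND PROOFS =====

-- A's if/elif chain routes each risk to exactly the bucket B's classifier names
theorem chain_eq_bucket (risk : List (String × String))
    (m : PySem.Dict String (List String)) :
    (if assocGetD risk "impact" "medium" == "high" &&
        (assocGetD risk "probability" "medium" == "high" || assocGetD risk "probability" "medium" == "medium") then
       m.modify "high_impact_high_prob" [] (· ++ [assocGetD risk "risk" ""])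
     else if assocGetD risk "impact" "medium" == "high" && assocGetD risk "probability" "medium" == "low" then
       m.modify "high_impact_low_prob" [] (· ++ [assocGetD risk "risk" ""])
     else if (assocGetD risk "impact" "medium" == "medium" || assocGetD risk "impact" "medium" == "low") &&
        (assocGetD risk "probability" "medium" == "high" || assocGetD risk "probability" "medium" == "medium") then
       m.modify "low_impact_high_prob" [] (· ++ [assocGetD risk "risk" ""])
     else
       m.modify "low_impact_low_prob" [] (· ++ [assocGetD risk "risk" ""]))
    = m.modify (bucket_key risk) [] (· ++ [assocGetD risk "risk" ""]) := by
  unfold bucket_key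
  by_cases h1 : assocGetD risk "impact" "medium" = "high" <;>
    by_cases h2 : assocGetD risk "impact" "medium" = "medium" <;>
    by_cases h3 : assocGetD risk "impact" "medium" = "low" <;>
    by_cases h4 : assocGetD risk "probability" "medium" = "high" <;>
    by_cases h5 : assocGetD risk "probability" "medium" = "medium" <;>
    by_cases h6 : assocGetD risk "probability" "medium" = "low" <;>
    simp_all

-- the classifier only ever returns one of the four cell names
theorem bucket_key_mem (risk : List (String × String)) : bucket_key risk ∈ pvKeys := by
  unfold bucket_key pvKeys
  dsimp only
  split_ifs <;> simp

-- modify-append on the literal four-key dict, one lemma per key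
theorem mod_k1 (l1 l2 l3 l4 : List String) (v : String) :
    (PySem.Dict.mk [("high_impact_high_prob", l1), ("high_impact_low_prob", l2),
      ("low_impact_high_prob", l3), ("low_impact_low_prob", l4)]).modify "high_impact_high_prob" [] (· ++ [v])
    = PySem.Dict.mk [("high_impact_high_prob", l1 ++ [v]), ("high_impact_low_prob", l2),
      ("low_impact_high_prob", l3), ("low_impact_low_prob", l4)] := by
  apply PySem.Dict.ext
  simp [PySem.Dict.modify, PySem.Dict.insert, PySem.Dict.getD, PySem.Dict.get?]

theorem mod_k2 (l1 l2 l3 l4 : List String) (v : String) :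
    (PySem.Dict.mk [("high_impact_high_prob", l1), ("high_impact_low_prob", l2),
      ("low_impact_high_prob", l3), ("low_impact_low_prob", l4)]).modify "high_impact_low_prob" [] (· ++ [v])
    = PySem.Dict.mk [("high_impact_high_prob", l1), ("high_impact_low_prob", l2 ++ [v]),
      ("low_impact_high_prob", l3), ("low_impact_low_prob", l4)] := by
  apply PySem.Dict.ext
  simp [PySem.Dict.modify, PySem.Dict.insert, PySem.Dict.getD, PySem.Dict.get?]

theorem mod_k3 (l1 l2 l3 l4 : List String) (v : String) :
    (PySem.Dict.mk [("high_impact_high_prob", l1), ("high_impact_low_prob", l2),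
      ("low_impact_high_prob", l3), ("low_impact_low_prob", l4)]).modify "low_impact_high_prob" [] (· ++ [v])
    = PySem.Dict.mk [("high_impact_high_prob", l1), ("high_impact_low_prob", l2),
      ("low_impact_high_prob", l3 ++ [v]), ("low_impact_low_prob", l4)] := by
  apply PySem.Dict.ext
  simp [PySem.Dict.modify, PySem.Dict.insert, PySem.Dict.getD, PySem.Dict.get?]

theorem mod_k4 (l1 l2 l3 l4 : List String) (v : String) :
    (PySem.Dict.mk [("high_impact_high_prob", l1), ("high_impact_low_prob", l2),
      ("low_impact_high_prob", l3), ("low_impact_low_prob", l4)]).modify "low_impact_low_prob" [] (· ++ [v])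
    = PySem.Dict.mk [("high_impact_high_prob", l1), ("high_impact_low_prob", l2),
      ("low_impact_high_prob", l3), ("low_impact_low_prob", l4 ++ [v])] := by
  apply PySem.Dict.ext
  simp [PySem.Dict.modify, PySem.Dict.insert, PySem.Dict.getD, PySem.Dict.get?]

-- folding bucket-keyed modify-append over the risks yields per-key filtered lists
theorem fold_items (risks : List (List (String × String))) (l1 l2 l3 l4 : List String) :
    (risks.foldl (fun (m : PySem.Dict String (List String)) r =>
        m.modify (bucket_key r) [] (· ++ [assocGetD r "risk" ""]))
      (PySem.Dict.mk [("high_impact_high_prob", l1), ("high_impact_low_prob", l2),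
                      ("low_impact_high_prob", l3), ("low_impact_low_prob", l4)])).items
    = [("high_impact_high_prob", l1 ++ (risks.filter (fun r => bucket_key r == "high_impact_high_prob")).map (fun r => assocGetD r "risk" "")),
       ("high_impact_low_prob", l2 ++ (risks.filter (fun r => bucket_key r == "high_impact_low_prob")).map (fun r => assocGetD r "risk" "")),
       ("low_impact_high_prob", l3 ++ (risks.filter (fun r => bucket_key r == "low_impact_high_prob")).map (fun r => assocGetD r "risk" "")),
       ("low_impact_low_prob", l4 ++ (risks.filter (fun r => bucket_key r == "low_impact_low_prob")).map (fun r => assocGetD r "risk" ""))] := by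
  induction risks generalizing l1 l2 l3 l4 with
  | nil => simp
  | cons r risks ih =>
    have hmem := bucket_key_mem r
    simp only [pvKeys, List.mem_cons, List.not_mem_nil, or_false] at hmem
    rcases hmem with hk | hk | hk | hk <;>
      rw [List.foldl_cons, hk] <;>
      [rw [mod_k1]; rw [mod_k2]; rw [mod_k3]; rw [mod_k4]] <;>
      rw [ih] <;>
      simp [hk]

-- ===== VERDICT (by name: the statement is the Claim_ definition above) =====
theorem create_risk_matrix_py_spec : Claim_equal_create_risk_matrix_py := by
  intro risks _ _
  unfold Spec_create_risk_matrix_py create_risk_matrix_py create_risk_matrix_py_alt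
  dsimp only
  rw [show ((((PySem.Dict.empty.insert "high_impact_high_prob" ([] : List String)).insert
        "high_impact_low_prob" []).insert
        "low_impact_high_prob" []).insert
        "low_impact_low_prob" [])
      = PySem.Dict.mk [("high_impact_high_prob", []), ("high_impact_low_prob", []),
                       ("low_impact_high_prob", []), ("low_impact_low_prob", [])] from rfl]
  rw [funext fun m => funext fun risk => chain_eq_bucket risk m]
  rw [fold_items]
  simp [pvKeys]
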